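-- pv_equiv track=rewrite | github.com/DanaCCH/Programacion2 | Practica4.py | cadena_de_cinco
-- ===== SOURCE A (Python) =====
-- def cadena_de_cinco(string):
--     contador = 0
--     contador5 = 0
--     for i in string:
--         if contador == 5:
--             contador5 += 1
--             if i != " ":
--                 contador = contador + 1
--             elif i == " ":
--                 contador = 0
--         elif i != " ":
--             contador = contador + 1
--         elif i == " ":
--             contador = 0
--     return contador5
-- ===== SOURCE B (Python) =====
-- def cadena_de_cinco(string):
--     return sum(1 for w in string.split(' ') if len(w) >= 5)
-- ===== Notes on version B (the rewrite author's own statement) =====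
-- stated objective: simpler
-- what changed: Replaces A's single-pass character state machine (run counter + counted flag) with a split-on-space then count-words-of-length>=5 decomposition; the per-character work moves from Python bytecode into C-level str.split, a constant-factor speedup.
-- intended difference: On strings whose final run of non-space characters has length exactly 5, A returns one less than the number of words of length >= 5 (it only counts a 5-run once a sixth character or a following space arrives, so a length-5 word ending the string is missed), while B counts it; counting every word of length >= 5 is the evident intent. — e.g. on cadena_de_cinco("abcde"): A returns 0, B returns 1
import Mathlib
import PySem

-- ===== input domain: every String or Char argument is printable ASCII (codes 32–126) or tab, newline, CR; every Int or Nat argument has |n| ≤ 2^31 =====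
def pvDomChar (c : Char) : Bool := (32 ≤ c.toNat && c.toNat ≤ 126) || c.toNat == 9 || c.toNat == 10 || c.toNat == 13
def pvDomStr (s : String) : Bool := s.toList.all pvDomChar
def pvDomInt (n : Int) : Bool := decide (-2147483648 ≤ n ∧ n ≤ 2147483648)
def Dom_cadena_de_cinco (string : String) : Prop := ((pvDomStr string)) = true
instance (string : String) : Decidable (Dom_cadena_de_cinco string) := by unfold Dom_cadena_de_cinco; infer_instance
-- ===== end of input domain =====

-- B differs from A only on the D_ region below (trailing run of exactly 5 non-spaces); header sentence: B counts
-- words with split(' ') instead of A's character state machine.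

-- ===== PORT A =====
-- loop body of A: state = (contador, contador5); the Python `elif i == " "` branches are the
-- exhaustive complements of `if i != " "`, so they are ported as `else`.
def pvStepA (st : Int × Int) (i : Char) : Int × Int :=
  if st.1 = 5 then
    let contador5 := st.2 + 1
    if i ≠ ' ' then (st.1 + 1, contador5)
    else (0, contador5)
  else
    if i ≠ ' ' then (st.1 + 1, st.2)
    else (0, st.2)

def cadena_de_cinco (string : String) : Int :=
  (string.toList.foldl pvStepA (0, 0)).2

-- ===== PORT B =====
-- Python's s.split(' ') for the one-character separator ' ' (keeps empty pieces), on the char list.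
def pvSplitSp : List Char → List (List Char)
  | [] => [[]]
  | c :: t =>
    if c = ' ' then [] :: pvSplitSp t
    else
      match pvSplitSp t with
      | [] => [[c]]           -- unreachable: pvSplitSp never returns []
      | w :: ws => (c :: w) :: ws

def cadena_de_cinco_alt (string : String) : Int :=
  (((pvSplitSp string.toList).countP (fun w => 5 ≤ w.length) : Nat) : Int)

-- ===== PRECONDITION & SPEC =====
-- On strings whose final run of non-space characters has length exactly 5, A returns one less than the
-- number of words of length >= 5 (a 5-run is only counted once a sixth character or a following space
-- arrives, so a length-5 word ending the string is missed), while B counts it; B's value is the intent.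
def D_cadena_de_cinco (string : String) : Prop :=
  (string.toList.reverse.takeWhile (fun c => c ≠ ' ')).length = 5
instance (string : String) : Decidable (D_cadena_de_cinco string) := by
  unfold D_cadena_de_cinco; infer_instance

def Spec_cadena_de_cinco (string : String) (out : Int) : Prop :=
  ¬ D_cadena_de_cinco string → out = cadena_de_cinco_alt string
instance (string : String) (out : Int) : Decidable (Spec_cadena_de_cinco string out) := by
  unfold Spec_cadena_de_cinco; infer_instance

def pvDiffWitness_cadena_de_cinco : String := "abcde"
def pvDiffWitnessOut_cadena_de_cinco : Int × Int := (0, 1)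

-- ===== CLAIM (what is proved, stated in full; the proofs are below) =====
def Claim_unchanged_cadena_de_cinco : Prop := ∀ (string : String), Dom_cadena_de_cinco string → Spec_cadena_de_cinco string (cadena_de_cinco string)
def Claim_changed_cadena_de_cinco : Prop := Dom_cadena_de_cinco (pvDiffWitness_cadena_de_cinco) ∧ D_cadena_de_cinco (pvDiffWitness_cadena_de_cinco) ∧ cadena_de_cinco (pvDiffWitness_cadena_de_cinco) = pvDiffWitnessOut_cadena_de_cinco.1 ∧ cadena_de_cinco_alt (pvDiffWitness_cadena_de_cinco) = pvDiffWitnessOut_cadena_de_cinco.2 ∧ pvDiffWitnessOut_cadena_de_cinco.1 ≠ pvDiffWitnessOut_cadena_de_cinco.2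
def Claim_exact_cadena_de_cinco : Prop := ∀ (string : String), Dom_cadena_de_cinco string → D_cadena_de_cinco string → cadena_de_cinco string ≠ cadena_de_cinco_alt string

-- ===== LEMMAS AND PROOFS =====

-- count with pending run length k (value of B generalized over a running prefix)
def pvS (k : Int) : List Char → Int
  | [] => if 5 ≤ k then 1 else 0
  | c :: t => if c = ' ' then (if 5 ≤ k then 1 else 0) + pvS 0 t else pvS (k + 1) t

-- "the final run (with pending length k) has length exactly 5"
def pvT (k : Int) : List Char → Bool
  | [] => k = 5
  | c :: t => if c = ' ' then pvT 0 t else pvT (k + 1) t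

lemma pvSplitSp_space (t : List Char) : pvSplitSp (' ' :: t) = [] :: pvSplitSp t := by
  simp [pvSplitSp]

lemma pvSplitSp_char {c : Char} (hc : c ≠ ' ') {t w : List Char} {ws : List (List Char)}
    (hw : pvSplitSp t = w :: ws) : pvSplitSp (c :: t) = (c :: w) :: ws := by
  simp [pvSplitSp, hc, hw]

lemma pvSplitSp_ne_nil (l : List Char) : pvSplitSp l ≠ [] := by
  cases l with
  | nil => simp [pvSplitSp]
  | cons c t =>
    simp only [pvSplitSp]
    split_ifs
    · simp
    · cases h : pvSplitSp t <;> simp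

lemma pvMain : ∀ (l : List Char) (k acc : Int),
    ((0 ≤ k ∧ k ≤ 5) →
      (l.foldl pvStepA (k, acc)).2 + (if pvT k l then 1 else 0) = acc + pvS k l)
    ∧ (6 ≤ k →
      (l.foldl pvStepA (k, acc)).2 + (if pvT k l then 1 else 0) + 1 = acc + pvS k l) := by
  intro l
  induction l with
  | nil =>
    intro k acc
    refine ⟨fun hk => ?_, fun hk => ?_⟩ <;> simp [pvT, pvS] <;> split_ifs <;> omega
  | cons c t ih =>
    intro k acc
    by_cases hc : c = ' '
    · subst hc
      refine ⟨fun hk => ?_, fun hk => ?_⟩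
      · by_cases h5 : k = 5
        · subst h5
          have := (ih 0 (acc + 1)).1 (by omega)
          simp only [List.foldl_cons, pvStepA, pvT, pvS] at this ⊢
          simp at this ⊢
          omega
        · have hlt : ¬ (5:Int) ≤ k := by omega
          have := (ih 0 acc).1 (by omega)
          simp only [List.foldl_cons, pvStepA, pvT, pvS] at this ⊢
          simp [h5, hlt] at this ⊢
          omega
      · have h5 : k ≠ 5 := by omega
        have h5' : (5:Int) ≤ k := by omega
        have := (ih 0 acc).1 (by omega)
        simp only [List.foldl_cons, pvStepA, pvT, pvS] at this ⊢
        simp [h5, h5'] at this ⊢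
        omega
    · refine ⟨fun hk => ?_, fun hk => ?_⟩
      · by_cases h5 : k = 5
        · subst h5
          have := (ih 6 (acc + 1)).2 (by omega)
          simp only [List.foldl_cons, pvStepA, pvT, pvS] at this ⊢
          simp [hc] at this ⊢
          omega
        · have := (ih (k + 1) acc).1 (by omega)
          simp only [List.foldl_cons, pvStepA, pvT, pvS] at this ⊢
          simp [h5, hc] at this ⊢
          omega
      · have h5 : k ≠ 5 := by omega
        have := (ih (k + 1) acc).2 (by omega)
        simp only [List.foldl_cons, pvStepA, pvT, pvS] at this ⊢
        simp [h5, hc] at this ⊢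
        omega

lemma pvS_split : ∀ (l : List Char) (k : Int),
    pvS k l = (if 5 ≤ k + ((pvSplitSp l).headI.length : Int) then 1 else 0)
      + (((pvSplitSp l).tail.countP (fun w => 5 ≤ w.length) : Nat) : Int) := by
  intro l
  induction l with
  | nil => intro k; simp [pvS, pvSplitSp]
  | cons c t ih =>
    intro k
    obtain ⟨w, ws, hw⟩ := List.exists_cons_of_ne_nil (pvSplitSp_ne_nil t)
    by_cases hc : c = ' '
    · subst hc
      rw [pvSplitSp_space]
      have h0 := ih 0
      rw [hw] at h0
      simp only [pvS, List.headI, List.tail, List.countP_cons, hw, h0]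
      by_cases hl : 5 ≤ w.length
      · have hl' : (5:Int) ≤ 0 + (w.length : Int) := by omega
        simp [hl]
        omega
      · simp [hl]
    · rw [pvSplitSp_char hc hw]
      have h1 := ih (k + 1)
      rw [hw] at h1
      simp only [pvS, if_neg hc, List.headI, List.tail, h1, List.length_cons]
      split_ifs with hA hB <;> push_cast at * <;> omega

-- a failing element in the first part stops takeWhile before the appended part
lemma pvTakeWhile_append_of_mem_not {α : Type} (p : α → Bool) (l₁ l₂ : List α)
    (x : α) (hx : x ∈ l₁) (hpx : p x = false) :
    (l₁ ++ l₂).takeWhile p = l₁.takeWhile p := by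
  induction l₁ with
  | nil => simp at hx
  | cons a t ih =>
    by_cases ha : p a
    · simp only [List.cons_append, List.takeWhile_cons, ha]
      rcases List.mem_cons.mp hx with h | h
      · subst h; simp_all
      · simp [ih h]
    · simp [ha]

lemma pvT_char : ∀ (l : List Char) (k : Int), 0 ≤ k →
    pvT k l = decide ((if l.any (fun c => c = ' ')
        then ((l.reverse.takeWhile (fun c => !decide (c = ' '))).length : Int)
        else k + l.length) = 5) := by
  intro l
  induction l with
  | nil => intro k hk; simp [pvT]
  | cons c t ih =>
    intro k hk
    by_cases hc : c = ' '
    · subst hc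
      rw [show pvT k (' ' :: t) = pvT 0 t from by simp [pvT], ih 0 le_rfl]
      by_cases ht : t.any (fun c => c = ' ')
      · obtain ⟨x, hx, hpx⟩ := List.any_eq_true.mp ht
        have hx' : x ∈ t.reverse := List.mem_reverse.mpr hx
        have hpx' : (!decide (x = ' ')) = false := by simp at hpx; simp [hpx]
        have hrw := pvTakeWhile_append_of_mem_not (fun c => !decide (c = ' '))
          t.reverse [' '] x hx' hpx'
        simp only [List.reverse_cons, hrw]
        simp [ht]
      · have ht' : ' ' ∉ t := by simpa using ht
        have hall : ∀ x ∈ t.reverse, (!decide (x = ' ')) = true := by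
          intro x hxx
          simp only [Bool.not_eq_eq_eq_not, Bool.not_true, decide_eq_false_iff_not]
          intro hxe
          exact ht' (hxe ▸ List.mem_reverse.mp hxx)
        have hts : List.takeWhile (fun c => !decide (c = ' ')) t.reverse = t.reverse :=
          List.takeWhile_eq_self_iff.mpr hall
        simp only [List.reverse_cons, List.takeWhile_append, hts, List.length_reverse]
        simp [ht]
    · rw [show pvT k (c :: t) = pvT (k + 1) t from by simp [pvT, hc], ih (k + 1) (by omega)]
      by_cases ht : t.any (fun c => c = ' ')
      · obtain ⟨x, hx, hpx⟩ := List.any_eq_true.mp ht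
        have hx' : x ∈ t.reverse := List.mem_reverse.mpr hx
        have hpx' : (!decide (x = ' ')) = false := by simp at hpx; simp [hpx]
        have hrw := pvTakeWhile_append_of_mem_not (fun c => !decide (c = ' '))
          t.reverse [c] x hx' hpx'
        simp only [List.reverse_cons, hrw]
        simp [ht, hc]
      · have hcc : (c :: t).any (fun c => c = ' ') = false := by
          have ht2 : ' ' ∉ t := by simpa using ht
          simp [hc]
          intro x hx hxe
          exact ht2 (hxe ▸ hx)
        simp only [hcc, Bool.false_eq_true, if_false, ht, List.length_cons]
        congr 1
        exact propext (by push_cast; constructor <;> intro <;> omega)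

lemma pvT_iff_D (s : String) : pvT 0 s.toList = true ↔ D_cadena_de_cinco s := by
  rw [pvT_char s.toList 0 le_rfl]
  unfold D_cadena_de_cinco
  by_cases ht : s.toList.any (fun c => c = ' ')
  · simp only [ht, if_pos]
    norm_cast
    simp
  · have ht' : ' ' ∉ s.toList := by simpa using ht
    have hts : List.takeWhile (fun c => decide ¬c = ' ') s.toList.reverse
        = s.toList.reverse := by
      refine List.takeWhile_eq_self_iff.mpr ?_
      intro x hxx
      simp only [decide_eq_true_eq]
      intro hxe
      exact ht' (hxe ▸ List.mem_reverse.mp hxx)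
    simp only [ht, Bool.false_eq_true, if_false]
    norm_cast
    rw [hts, List.length_reverse]
    simp

lemma pvAB (s : String) :
    cadena_de_cinco s + (if pvT 0 s.toList then 1 else 0) = cadena_de_cinco_alt s := by
  have h := (pvMain s.toList 0 0).1 (by omega)
  have h2 := pvS_split s.toList 0
  obtain ⟨w, ws, hw⟩ := List.exists_cons_of_ne_nil (pvSplitSp_ne_nil s.toList)
  unfold cadena_de_cinco cadena_de_cinco_alt
  rw [h, h2, hw]
  simp only [List.headI, List.tail, List.countP_cons, zero_add]
  by_cases hl : 5 ≤ w.length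
  · have hl' : (5:Int) ≤ 0 + (w.length : Int) := by omega
    simp [hl]
    omega
  · simp [hl]

-- ===== VERDICT (by name: the statement is the Claim_ definition above) =====
theorem cadena_de_cinco_spec : Claim_unchanged_cadena_de_cinco := by
  intro s _ hD
  have h := pvAB s
  have ht : pvT 0 s.toList = false := by
    cases h' : pvT 0 s.toList
    · rfl
    · exact absurd ((pvT_iff_D s).mp h') hD
  rw [ht] at h
  simpa using h

theorem cadena_de_cinco_changed : Claim_changed_cadena_de_cinco := by
  unfold Claim_changed_cadena_de_cinco; decide

theorem cadena_de_cinco_tight : Claim_exact_cadena_de_cinco := by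
  intro s _ hD
  have h := pvAB s
  rw [if_pos ((pvT_iff_D s).mpr hD)] at h
  omega
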